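-- pv_equiv track=rewrite | github.com/Arsen1302/Code-copy-detector | TestData/solutions/problem_1080_4.py | solution_1080_4
-- ===== SOURCE A (Python) =====
-- from typing import List
--
-- def solution_1080_4(logs: List[str]) -> int:
--     stack=[]
--     for i in logs:
--         if(i=='../' and stack):
--             stack.pop()
--         elif(i=='./'):
--             continue
--         elif(i!='../' ):
--             stack.append(i)
--     return len(stack)
-- ===== SOURCE B (Python) =====
-- from typing import List
--
-- def solution_1080_4(logs: List[str]) -> int:
--     # Map each log to a depth delta, then use the identity that the final value of a
--     # 0-clamped walk equals the maximum suffix sum of the deltas (empty suffix = 0),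
--     # computed in one reverse pass.
--     deltas = [-1 if t == '../' else (0 if t == './' else 1) for t in logs]
--     running = 0
--     best = 0
--     for d in reversed(deltas):
--         running += d
--         if running > best:
--             best = running
--     return best
-- ===== Notes on version B (the rewrite author's own statement) =====
-- stated objective: alternative
-- what changed: Replaces the stack simulation by a two-stage computation: map each log to a depth delta (-1/0/+1), then compute the maximum suffix sum of the deltas in a reverse pass, using the identity that a 0-clamped walk ends at the maximum suffix sum.
import Mathlib
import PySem

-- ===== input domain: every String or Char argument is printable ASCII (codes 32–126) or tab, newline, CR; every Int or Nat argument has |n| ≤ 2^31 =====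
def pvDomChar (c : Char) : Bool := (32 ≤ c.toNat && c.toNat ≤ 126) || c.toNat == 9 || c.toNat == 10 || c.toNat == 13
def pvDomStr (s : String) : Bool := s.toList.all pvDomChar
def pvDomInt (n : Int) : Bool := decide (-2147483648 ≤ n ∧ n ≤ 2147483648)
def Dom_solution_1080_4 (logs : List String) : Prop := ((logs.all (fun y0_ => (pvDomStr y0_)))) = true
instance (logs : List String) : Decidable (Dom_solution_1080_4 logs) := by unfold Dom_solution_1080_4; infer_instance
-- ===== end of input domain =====

-- B computes the answer as the maximum suffix sum of per-log depth deltas (reverse pass),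
-- instead of A's forward stack simulation; objective: alternative algorithm, same cost.
-- ===== PORT A =====
def pvALoop (stack : List String) (logs : List String) : List String :=
  match logs with
  | [] => stack
  | i :: rest =>
    if i = "../" ∧ stack ≠ [] then pvALoop stack.dropLast rest
    else if i = "./" then pvALoop stack rest
    else if i ≠ "../" then pvALoop (stack ++ [i]) rest
    else pvALoop stack rest

def solution_1080_4 (logs : List String) : Int :=
  ((pvALoop [] logs).length : Int)

-- ===== PORT B =====
def pvDelta (t : String) : Int := if t = "../" then -1 else if t = "./" then 0 else 1

def pvBStep (p : Int × Int) (d : Int) : Int × Int :=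
  let running := p.1 + d
  (running, if p.2 < running then running else p.2)

def solution_1080_4_alt (logs : List String) : Int :=
  ((logs.map pvDelta).reverse.foldl pvBStep (0, 0)).2

-- ===== PRECONDITION & SPEC =====
def Spec_solution_1080_4 (logs : List String) (out : Int) : Prop := out = solution_1080_4_alt logs
instance (logs : List String) (out : Int) : Decidable (Spec_solution_1080_4 logs out) := by unfold Spec_solution_1080_4; infer_instance

-- ===== CLAIM (what is proved, stated in full; the proofs are below) =====
def Claim_equal_solution_1080_4 : Prop := ∀ (logs : List String), Dom_solution_1080_4 logs → Spec_solution_1080_4 logs (solution_1080_4 logs)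

-- ===== LEMMAS AND PROOFS =====

-- the 0-clamped forward walk (reference semantics both ports are related to)
def pvClamp (x : Int) (ds : List Int) : Int :=
  match ds with
  | [] => x
  | d :: rest => pvClamp (max (x + d) 0) rest

-- maximum suffix sum (including the empty suffix, value 0)
def pvMss (ds : List Int) : Int :=
  match ds with
  | [] => 0
  | d :: rest => max (d + rest.sum) (pvMss rest)

lemma pvClamp_cons (x d : Int) (ds : List Int) :
    pvClamp x (d :: ds) = pvClamp (max (x + d) 0) ds := rfl

lemma sum_le_mss (ds : List Int) : ds.sum ≤ pvMss ds := by
  induction ds with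
  | nil => simp [pvMss]
  | cons d rest ih =>
    simp only [pvMss, List.sum_cons]
    exact le_max_left _ _

lemma clamp_eq (ds : List Int) : ∀ x : Int, 0 ≤ x →
    pvClamp x ds = max (x + ds.sum) (pvMss ds) := by
  induction ds with
  | nil => intro x hx; simp [pvClamp, pvMss]; omega
  | cons d rest ih =>
    intro x hx
    have h := ih (max (x + d) 0) (le_max_right _ _)
    have hs := sum_le_mss rest
    simp only [pvClamp_cons, List.sum_cons, pvMss] at *
    omega

lemma aLoop_len (logs : List String) : ∀ stack : List String,
    ((pvALoop stack logs).length : Int) = pvClamp (stack.length : Int) (logs.map pvDelta) := by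
  induction logs with
  | nil => intro stack; simp [pvALoop, pvClamp]
  | cons i rest ih =>
    intro stack
    rw [List.map_cons, pvClamp_cons]
    by_cases h1 : i = "../"
    · subst h1
      by_cases h2 : stack = []
      · subst h2
        have e : pvALoop [] ("../" :: rest) = pvALoop [] rest := by
          simp [pvALoop]
        rw [e, ih []]
        rfl
      · have e : pvALoop stack ("../" :: rest) = pvALoop stack.dropLast rest := by
          simp [pvALoop, h2]
        have hlen : 1 ≤ stack.length := List.length_pos_iff.mpr h2
        have hd : pvDelta "../" = -1 := rfl
        rw [e, ih stack.dropLast]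
        congr 1
        rw [hd, List.length_dropLast, max_def]
        split_ifs <;> omega
    · by_cases h3 : i = "./"
      · subst h3
        have e : pvALoop stack ("./" :: rest) = pvALoop stack rest := by
          simp [pvALoop]
        have hd : pvDelta "./" = 0 := rfl
        rw [e, ih stack]
        congr 1
        rw [hd, max_def]
        split_ifs <;> omega
      · have e : pvALoop stack (i :: rest) = pvALoop (stack ++ [i]) rest := by
          simp [pvALoop, h1, h3]
        have hd : pvDelta i = 1 := by simp [pvDelta, h1, h3]
        rw [e, ih (stack ++ [i])]
        congr 1
        rw [hd]
        simp only [List.length_append, List.length_cons, List.length_nil, max_def]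
        split_ifs <;> omega

lemma bFold_eq (ds : List Int) :
    ds.reverse.foldl pvBStep (0, 0) = (ds.sum, pvMss ds) := by
  rw [List.foldl_reverse]
  induction ds with
  | nil => simp [pvMss]
  | cons d rest ih =>
    rw [List.foldr_cons, ih]
    simp only [pvBStep, pvMss, List.sum_cons, Prod.mk.injEq, max_def]
    constructor
    · omega
    · split_ifs <;> omega

-- ===== VERDICT (by name: the statement is the Claim_ definition above) =====
theorem solution_1080_4_spec : Claim_equal_solution_1080_4 := by
  intro logs _
  unfold Spec_solution_1080_4 solution_1080_4 solution_1080_4_alt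
  rw [bFold_eq]
  have h := aLoop_len logs []
  simp only [List.length_nil, Nat.cast_zero] at h
  rw [h, clamp_eq _ 0 le_rfl]
  have := sum_le_mss (logs.map pvDelta)
  simp
  omega
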